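/- GENERATED by farm/mkstatement.py from design/units.tsv (unit `DGifOpen.5`) and the assertions of Gif/Spec/Seg_DGifOpen.lean — do not edit.
   THE STATEMENT of the proof unit `DGifOpen.5`: segment 5 of `DGifOpen` (23 instructions; entries 0x1087da;
   exits 0x108816; ranges 0x1087da-0x108816,0x1088cb-0x1088fa)
   takes each of its entry assertions to one of its exit assertions (`Gif.Spec.DGifOpen.Seg5`), given the contracts of its callees.
   What the names mean: ProgX/Base/Spec/Basic.lean (the shared hypotheses), Gif/Spec/Seg_DGifOpen.lean (the assertions). The theorem to prove:
   `theorem DGifOpen_5_ok : Gif.Spec.DGifOpen_5.Statement`. -/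
import Gif.Code
import Gif.Dec.All
import Gif.Labels
import Gif.Spec.Desc
import Gif.Spec.Seg_DGifOpen
import ProgX.Base.Spec.Heap
namespace Gif.Spec.DGifOpen_5
open X86 X86.User Asan

/-- The statement of unit `DGifOpen.5`. -/
def Statement : Prop :=
  ∀ (Lay : Layout) (_hLay : Lay.hi = 0x1000000) (μ : Microarch) (_hμ : UserX.MicroOK μ) (u₀ : State)
    (_hcode : HasCodeNat Lay u₀ Gif.L.DGifOpen.entry Gif.Code.code_DGifOpen.nat Gif.L.DGifOpen.size)
    (_h_DGifGetScreenDesc : ∀ (H : Heap) (rest : List Obj) (frames : List (Nat × FrameLayout)) (F : Forest) (R : Rd), Calls Lay μ ProgX.Base.WayInv (ProgX.Base.conv u₀) Gif.L.DGifGetScreenDesc.entry (Gif.Spec.DGifGetScreenDesc.spec H rest frames F R))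
    (_h_free : ∀ (H : Heap) (rest : List Obj) (frames : List (Nat × FrameLayout)) (n : Nat), Calls Lay μ ProgX.Base.WayInv (ProgX.Base.conv u₀) ProgX.Base.L.free.entry (ProgX.Base.Spec.free.spec H rest frames n))
    (_h_asan_store4_noabort : Asan.SmallCheck Lay μ ProgX.Base.WayInv (ProgX.Base.CodeOK u₀) [.rax, .rcx, .rdx] 4 ProgX.Base.L.__asan_store4_noabort.entry)
    (_h_asan_store1_noabort : Asan.SmallCheck Lay μ ProgX.Base.WayInv (ProgX.Base.CodeOK u₀) [.rax, .rdx] 1 ProgX.Base.L.__asan_store1_noabort.entry),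
    Gif.Spec.DGifOpen.Seg5 Lay μ u₀

end Gif.Spec.DGifOpen_5
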